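-- pv_equiv track=rewrite | github.com/qwertyoutreach7-design/rolex | scheduler.py | get_target_root
-- ===== SOURCE A (Python) =====
-- def normalize_domain(domain: str) -> str:
--     d = (domain or "").strip().lower()
--     return d[4:] if d.startswith("www.") else d
--
-- def get_target_root(domain: str, target_domains: list):
--     d = normalize_domain(domain)
--     for t in target_domains:
--         t_norm = normalize_domain(t)
--         if not t_norm:
--             continue
--         if d == t_norm or d.endswith("." + t_norm):
--             return t_norm
--     return None
-- ===== SOURCE B (Python) =====
-- def normalize_domain(domain: str) -> str:
--     d = (domain or "").strip().lower()
--     return d[4:] if d.startswith("www.") else d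
--
-- def get_target_root(domain: str, target_domains: list):
--     d = normalize_domain(domain)
--     # candidate roots: d itself and every dot-suffix of d
--     cands = {d}
--     for i, ch in enumerate(d):
--         if ch == '.':
--             cands.add(d[i + 1:])
--     for t in target_domains:
--         t_norm = normalize_domain(t)
--         if t_norm and t_norm in cands:
--             return t_norm
--     return None
-- ===== Notes on version B (the rewrite author's own statement) =====
-- stated objective: alternative
-- what changed: B precomputes the set of dot-suffix candidates of the normalized domain once, so each target is checked by one set-membership lookup instead of an endswith scan over the domain; measured runtime is about the same because normalization dominates.
import Mathlib
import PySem

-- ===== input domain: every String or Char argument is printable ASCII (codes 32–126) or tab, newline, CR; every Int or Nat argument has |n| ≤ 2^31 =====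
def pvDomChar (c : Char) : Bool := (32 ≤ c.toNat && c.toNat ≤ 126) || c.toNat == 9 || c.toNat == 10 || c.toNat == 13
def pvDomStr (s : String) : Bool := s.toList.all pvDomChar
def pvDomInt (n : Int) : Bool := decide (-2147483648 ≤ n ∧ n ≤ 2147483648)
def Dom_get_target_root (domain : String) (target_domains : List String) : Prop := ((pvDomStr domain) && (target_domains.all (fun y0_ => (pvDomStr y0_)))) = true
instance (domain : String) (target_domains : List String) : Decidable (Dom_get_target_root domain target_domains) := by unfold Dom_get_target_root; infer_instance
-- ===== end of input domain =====

-- B replaces A's per-target endswith scan by one precomputed set of dot-suffix candidates of the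
-- normalized domain, checked by set membership per target (objective: alternative algorithm).

-- ===== PORT A =====
-- helper normalize_domain (shared by both Pythons verbatim)
def normD (domain : String) : String :=
  let d := PySem.Str.lower (PySem.Str.strip domain)
  if PySem.Str.startswith d "www." then PySem.Str.slice d (some 4) none else d

def goA (d : String) : List String → Option String
  | [] => none
  | t :: ts =>
    let tn := normD t
    if tn = "" then goA d ts
    else if (d == tn || PySem.Str.endswith d ("." ++ tn)) then some tn
    else goA d ts

def get_target_root (domain : String) (target_domains : List String) : Option String :=
  goA (normD domain) target_domains

-- ===== PORT B =====
-- cands = {d} ∪ { d[i+1:] | d[i] == '.' }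
def buildCands (d : String) : PySem.Set String :=
  (PySem.List.enumerate d.toList 0).foldl
    (fun s p => if p.2 == '.' then PySem.Set.add s (PySem.Str.slice d (some (p.1 + 1)) none) else s)
    (PySem.Set.ofList [d])

def goB (cands : PySem.Set String) : List String → Option String
  | [] => none
  | t :: ts =>
    let tn := normD t
    if (!(tn == "") && PySem.Set.contains cands tn) then some tn else goB cands ts

def get_target_root_alt (domain : String) (target_domains : List String) : Option String :=
  goB (buildCands (normD domain)) target_domains

-- ===== PRECONDITION & SPEC =====
def Spec_get_target_root (domain : String) (target_domains : List String) (out : Option String) : Prop := out = get_target_root_alt domain target_domains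
instance (domain : String) (target_domains : List String) (out : Option String) : Decidable (Spec_get_target_root domain target_domains out) := by unfold Spec_get_target_root; infer_instance

-- ===== CLAIM (what is proved, stated in full; the proofs are below) =====
def Claim_equal_get_target_root : Prop := ∀ (domain : String) (target_domains : List String), Dom_get_target_root domain target_domains → Spec_get_target_root domain target_domains (get_target_root domain target_domains)

-- ===== LEMMAS AND PROOFS =====

theorem mem_foldl_if_add {α β : Type} [BEq α] [LawfulBEq α]
    (l : List β) (P : β → Bool) (f : β → α) (s0 : PySem.Set α) (x : α) :
    x ∈ l.foldl (fun s p => if P p then PySem.Set.add s (f p) else s) s0 ↔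
      x ∈ s0 ∨ ∃ p ∈ l, P p ∧ x = f p := by
  induction l generalizing s0 with
  | nil => simp
  | cons b bs ih =>
    simp only [List.foldl_cons, ih, List.mem_cons]
    by_cases hb : P b = true
    · simp only [hb, if_true, PySem.Set.mem_add]
      constructor
      · rintro ((h | h) | ⟨p, hp, hP, hx⟩)
        · exact Or.inl h
        · exact Or.inr ⟨b, Or.inl rfl, hb, h⟩
        · exact Or.inr ⟨p, Or.inr hp, hP, hx⟩
      · rintro (h | ⟨p, (rfl | hp), hP, hx⟩)
        · exact Or.inl (Or.inl h)
        · exact Or.inl (Or.inr hx)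
        · exact Or.inr ⟨p, hp, hP, hx⟩
    · simp only [hb, if_false, Bool.false_eq_true]
      constructor
      · rintro (h | ⟨p, hp, hP, hx⟩)
        · exact Or.inl h
        · exact Or.inr ⟨p, Or.inr hp, hP, hx⟩
      · rintro (h | ⟨p, (rfl | hp), hP, hx⟩)
        · exact Or.inl h
        · exact absurd hP hb
        · exact Or.inr ⟨p, hp, hP, hx⟩

theorem suffix_dot_iff (dl tl : List Char) :
    ('.' :: tl) <:+ dl ↔ ∃ (k : Nat) (h : k < dl.length), dl[k] = '.' ∧ tl = dl.drop (k + 1) := by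
  constructor
  · rintro ⟨pre, hp⟩
    subst hp
    refine ⟨pre.length, by simp, ?_, ?_⟩
    · simp
    · rw [show pre.length + 1 = pre.length + 1 from rfl, ← List.singleton_append,
        ← List.append_assoc]
      rw [List.drop_left' (by simp)]
  · rintro ⟨k, hk, hdot, htl⟩
    refine ⟨dl.take k, ?_⟩
    conv_rhs => rw [← List.take_append_drop k dl]
    congr 1
    rw [List.drop_eq_getElem_cons hk, hdot, htl]

theorem toList_sliceFrom (d : String) (k : Nat) :
    (PySem.Str.slice d (some (((0 : Int) + k) + 1)) none).toList = d.toList.drop (k + 1) := by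
  have h1 : ((0 : Int) + k) + 1 = ((k + 1 : Nat) : Int) := by push_cast; ring
  rw [h1]
  simp only [PySem.Str.toList_slice, PySem.Chars.slice_eq_listSlice,
    PySem.List.slice_from_natCast]

theorem mem_buildCands (d x : String) :
    x ∈ buildCands d ↔
      x = d ∨ ∃ (k : Nat) (h : k < d.toList.length),
        d.toList[k] = '.' ∧ x.toList = d.toList.drop (k + 1) := by
  unfold buildCands
  rw [mem_foldl_if_add]
  simp only [PySem.Set.mem_ofList, List.mem_singleton, PySem.List.mem_enumerate_iff]
  constructor
  · rintro (h | ⟨p, ⟨k, hk, rfl⟩, hdot, rfl⟩)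
    · exact Or.inl h
    · exact Or.inr ⟨k, hk, by simpa using hdot, toList_sliceFrom d k⟩
  · rintro (rfl | ⟨k, hk, hdot, hx⟩)
    · exact Or.inl rfl
    · refine Or.inr ⟨((0 : Int) + k, d.toList[k]), ⟨k, hk, rfl⟩, by simpa using hdot, ?_⟩
      apply String.toList_injective
      rw [hx, toList_sliceFrom d k]

theorem cond_eq (d tn : String) :
    (d == tn || PySem.Str.endswith d ("." ++ tn))
      = PySem.Set.contains (buildCands d) tn := by
  rw [Bool.eq_iff_iff]
  have hc : PySem.Set.contains (buildCands d) tn = true ↔ tn ∈ buildCands d := by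
    simp [PySem.Set.contains]
  rw [hc, mem_buildCands]
  have hcat : ("." ++ tn).toList = '.' :: tn.toList := by simp
  simp only [Bool.or_eq_true, beq_iff_eq, PySem.Str.endswith_eq, PySem.Chars.endswith_iff,
    hcat, suffix_dot_iff]
  constructor
  · rintro (rfl | h)
    · exact Or.inl rfl
    · exact Or.inr h
  · rintro (rfl | h)
    · exact Or.inl rfl
    · exact Or.inr h

theorem goA_eq_goB (d : String) (ts : List String) :
    goA d ts = goB (buildCands d) ts := by
  induction ts with
  | nil => rfl
  | cons t ts ih =>
    simp only [goA, goB]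
    by_cases h : normD t = ""
    · simp [h, ih]
    · have hne : (normD t == "") = false := by simpa using h
      rw [cond_eq]
      simp [h, hne, ih]

-- ===== VERDICT (by name: the statement is the Claim_ definition above) =====
theorem get_target_root_spec : Claim_equal_get_target_root := by
  intro domain target_domains _
  unfold Spec_get_target_root get_target_root get_target_root_alt
  exact goA_eq_goB _ _
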